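-- pv_equiv track=rewrite | github.com/asifhussain60/CORTEX | src/epm/modules/validation_engine.py | _document_exists
-- ===== SOURCE A (Python) =====
-- from typing import List, Tuple, Dict, Any
--
-- def _document_exists(pattern: Dict, existing_docs: List[str]) -> bool:
--     """
--     Check if a document pattern matches any existing docs
--
--     Supports flexible matching:
--     - Exact match
--     - Pattern-based (e.g., guides/code-*.md)
--     - Related naming (code-writing vs code_writing)
--     """
--     expected_pattern = pattern['pattern']
--
--     # Exact match
--     if expected_pattern in existing_docs:
--         return True
--
--     # Flexible matching (underscores vs hyphens)
--     flexible_pattern = expected_pattern.replace('-', '_')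
--     for doc in existing_docs:
--         if doc.replace('-', '_') == flexible_pattern:
--             return True
--
--     # Partial match (e.g., guides/code-writing-guide.md matches guides/code-writing.md)
--     base_pattern = expected_pattern.rsplit('.', 1)[0]  # Remove .md
--     for doc in existing_docs:
--         doc_base = doc.rsplit('.', 1)[0]
--         if doc_base.startswith(base_pattern) or base_pattern in doc_base:
--             return True
--
--     return False
-- ===== SOURCE B (Python) =====
-- def _doc_matches(doc, expected, flexible, base):
--     """Does one existing doc match any of the three pattern forms?"""
--     doc_base = doc.rsplit('.', 1)[0]
--     return (doc == expected
--             or doc.replace('-', '_') == flexible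
--             or doc_base.startswith(base)
--             or base in doc_base)
--
--
-- def _document_exists(pattern, existing_docs):
--     """Single short-circuiting pass: precompute the three pattern forms once
--     and test each doc with one predicate instead of three staged scans."""
--     expected = pattern['pattern']
--     flexible = expected.replace('-', '_')
--     base = expected.rsplit('.', 1)[0]
--     return any(_doc_matches(doc, expected, flexible, base) for doc in existing_docs)
-- ===== Notes on version B (the rewrite author's own statement) =====
-- stated objective: simpler
-- what changed: A's three staged scans of existing_docs (exact, hyphen/underscore-flexible, base-pattern partial) are replaced by one short-circuiting pass using a single per-doc predicate helper with the three pattern forms precomputed once.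
import Mathlib
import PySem

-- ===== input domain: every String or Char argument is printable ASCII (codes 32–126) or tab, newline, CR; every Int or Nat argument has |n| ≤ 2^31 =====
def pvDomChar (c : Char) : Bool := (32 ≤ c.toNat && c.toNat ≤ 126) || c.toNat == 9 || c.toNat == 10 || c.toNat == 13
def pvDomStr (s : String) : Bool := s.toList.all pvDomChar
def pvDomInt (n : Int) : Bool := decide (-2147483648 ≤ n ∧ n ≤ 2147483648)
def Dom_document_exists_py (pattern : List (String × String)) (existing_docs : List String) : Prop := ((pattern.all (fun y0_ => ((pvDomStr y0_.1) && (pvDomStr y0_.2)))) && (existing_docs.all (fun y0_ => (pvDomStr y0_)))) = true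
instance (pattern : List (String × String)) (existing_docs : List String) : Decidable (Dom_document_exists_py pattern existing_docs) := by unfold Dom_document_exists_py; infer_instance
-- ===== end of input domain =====

-- B replaces A's three staged scans by one short-circuiting pass with a per-doc predicate helper (objective: simpler); A's KeyError inputs (no 'pattern' key) are excluded by Pre_.


-- Hand port of s.rsplit('.', 1)[0] (exact: text before the LAST '.', or the whole
-- string when there is no '.'): scan the reversed characters for the first '.'.
def pyRsplitDotHeadAux : List Char → Option (List Char)
  | [] => none
  | c :: t => if c = '.' then some t else pyRsplitDotHeadAux t

def pyRsplitDotHead (s : String) : String :=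
  match pyRsplitDotHeadAux s.toList.reverse with
  | some t => String.ofList t.reverse
  | none => s

-- ===== PORT A =====
def document_exists_py (pattern : List (String × String)) (existing_docs : List String) : Bool :=
  match PySem.Dict.get? (PySem.Dict.mk pattern) "pattern" with
  | none => false  -- KeyError in Python; excluded by Pre_
  | some expected_pattern =>
    if existing_docs.contains expected_pattern then true
    else
      let flexible_pattern := PySem.Str.replace expected_pattern "-" "_"
      if existing_docs.any (fun doc => PySem.Str.replace doc "-" "_" == flexible_pattern) then true
      else
        let base_pattern := pyRsplitDotHead expected_pattern
        existing_docs.any (fun doc =>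
          let doc_base := pyRsplitDotHead doc
          PySem.Str.startswith doc_base base_pattern || PySem.Str.isIn base_pattern doc_base)

-- ===== PORT B =====
-- port of Source B's helper _doc_matches
def pvDocMatches (doc expected flexible base : String) : Bool :=
  let doc_base := pyRsplitDotHead doc
  doc == expected
    || PySem.Str.replace doc "-" "_" == flexible
    || PySem.Str.startswith doc_base base
    || PySem.Str.isIn base doc_base

-- port of Source B's short-circuiting `any(... for doc in existing_docs)` as a structural recursion
def pvScanDocs (expected flexible base : String) : List String → Bool
  | [] => false
  | doc :: rest =>
    if pvDocMatches doc expected flexible base then true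
    else pvScanDocs expected flexible base rest

def document_exists_py_alt (pattern : List (String × String)) (existing_docs : List String) : Bool :=
  match PySem.Dict.get? (PySem.Dict.mk pattern) "pattern" with
  | none => false  -- KeyError in Python; excluded by Pre_
  | some expected =>
    pvScanDocs expected (PySem.Str.replace expected "-" "_") (pyRsplitDotHead expected) existing_docs

-- ===== PRECONDITION & SPEC =====
-- Pre_: Python A raises KeyError when the dict has no key 'pattern'; exactly those inputs are excluded.
def Pre_document_exists_py (pattern : List (String × String)) (existing_docs : List String) : Prop :=
  "pattern" ∈ pattern.map Prod.fst
instance (pattern : List (String × String)) (existing_docs : List String) : Decidable (Pre_document_exists_py pattern existing_docs) := by unfold Pre_document_exists_py; infer_instance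

def pvWitness_document_exists_py : (List (String × String)) × List String :=
  ([("pattern", "guides/code-writing.md")], ["guides/code_writing.md"])

def Spec_document_exists_py (pattern : List (String × String)) (existing_docs : List String) (out : Bool) : Prop := out = document_exists_py_alt pattern existing_docs
instance (pattern : List (String × String)) (existing_docs : List String) (out : Bool) : Decidable (Spec_document_exists_py pattern existing_docs out) := by unfold Spec_document_exists_py; infer_instance

-- ===== CLAIM (what is proved, stated in full; the proofs are below) =====
def Claim_equal_document_exists_py : Prop := ∀ (pattern : List (String × String)) (existing_docs : List String), Dom_document_exists_py pattern existing_docs → Pre_document_exists_py pattern existing_docs → Spec_document_exists_py pattern existing_docs (document_exists_py pattern existing_docs)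

-- ===== LEMMAS AND PROOFS =====

-- B's recursive short-circuit scan is List.any of the per-doc predicate
theorem pv_scan_eq_any (e f b : String) (l : List String) :
    pvScanDocs e f b l = l.any (fun d => pvDocMatches d e f b) := by
  induction l with
  | nil => rfl
  | cons h t ih =>
    cases hm : pvDocMatches h e f b <;> simp [pvScanDocs, ih, hm]

-- any over a pointwise disjunction splits into a disjunction of anys
theorem pv_any_or (l : List String) (f g : String → Bool) :
    (l.any fun x => f x || g x) = (l.any f || l.any g) := by
  induction l with
  | nil => rfl
  | cons h t ih =>
    simp [List.any_cons, ih, Bool.or_assoc, Bool.or_left_comm]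

theorem pv_contains_eq_any (l : List String) (a : String) :
    l.contains a = l.any (fun x => x == a) := by
  simp [List.any_eq]

-- ===== VERDICT (by name: the statement is the Claim_ definition above) =====
theorem document_exists_py_spec : Claim_equal_document_exists_py := by
  intro pattern existing_docs _ hpre
  unfold Spec_document_exists_py document_exists_py document_exists_py_alt
  cases hg : PySem.Dict.get? (PySem.Dict.mk pattern) "pattern" with
  | none =>
    exfalso
    rw [PySem.Dict.get?_eq_none_iff_not_mem_keys] at hg
    have h' : "pattern" ∈ pattern.map Prod.fst := hpre
    simp only [List.mem_map] at h'
    obtain ⟨⟨k, v⟩, hk, hke⟩ := h'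
    dsimp at hke
    subst hke
    exact hg (by simp [PySem.Dict.keys]; exact ⟨v, hk⟩)
  | some ep =>
    simp only
    rw [pv_scan_eq_any]
    unfold pvDocMatches
    rw [pv_any_or, pv_any_or, pv_any_or, pv_contains_eq_any]
    split_ifs with h1 h2
    · simp only [List.any_eq, decide_eq_true_eq, beq_iff_eq] at h1
      obtain ⟨x, hx, he⟩ := h1
      symm
      simp only [List.any_eq, Bool.or_eq_true, decide_eq_true_eq, beq_iff_eq]
      exact Or.inl (Or.inl ⟨x, hx, Or.inl he⟩)
    · simp only [List.any_eq, decide_eq_true_eq, beq_iff_eq] at h2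
      obtain ⟨x, hx, he⟩ := h2
      symm
      simp only [List.any_eq, Bool.or_eq_true, decide_eq_true_eq, beq_iff_eq]
      exact Or.inl (Or.inl ⟨x, hx, Or.inr he⟩)
    · have hz : (existing_docs.any fun doc =>
          doc == ep || PySem.Str.replace doc "-" "_" == PySem.Str.replace ep "-" "_") = false := by
        rw [List.any_eq_false]
        intro x hx
        simp only [List.any_eq, decide_eq_true_eq, beq_iff_eq] at h1 h2
        simp only [Bool.or_eq_true, beq_iff_eq, not_or]
        exact ⟨fun h => h1 ⟨x, hx, h⟩, fun h => h2 ⟨x, hx, h⟩⟩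
      rw [hz]
      simp
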